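-- pv_equiv track=rewrite | github.com/Data4Democracy/internal-displacement | internal_displacement/excerpt_helper.py | get_closest_number
-- ===== SOURCE A (Python) =====
-- def get_closest_number(possible_numbers, possible_units):
--     '''Get closest number in text to word that most closely matches the given unit'''
--     if len(possible_units) > 0:
--         first_unit_place = possible_units[0][1]
--         diffs = [(p, first_unit_place - n)
--                  for p, n in possible_numbers if first_unit_place - n > 0]
--         if len(diffs) > 0:
--             return sorted(diffs, key=lambda x: x[1])[0][0]
--     return 0
-- ===== SOURCE B (Python) =====
-- def get_closest_number(possible_numbers, possible_units):
--     '''Get closest number in text to word that most closely matches the given unit'''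
--     if len(possible_units) == 0:
--         return 0
--     first_unit_place = possible_units[0][1]
--     best_p = None
--     best_diff = None
--     for p, n in possible_numbers:
--         d = first_unit_place - n
--         if d > 0 and (best_diff is None or d < best_diff):
--             best_p, best_diff = p, d
--     return best_p if best_diff is not None else 0
-- ===== Notes on version B (the rewrite author's own statement) =====
-- stated objective: faster
-- what changed: Replaces building a filtered diffs list and stable-sorting it to take the head with a single best-tracking pass over possible_numbers (strict < keeps the first minimal diff, matching the stable sort).
import Mathlib
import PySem

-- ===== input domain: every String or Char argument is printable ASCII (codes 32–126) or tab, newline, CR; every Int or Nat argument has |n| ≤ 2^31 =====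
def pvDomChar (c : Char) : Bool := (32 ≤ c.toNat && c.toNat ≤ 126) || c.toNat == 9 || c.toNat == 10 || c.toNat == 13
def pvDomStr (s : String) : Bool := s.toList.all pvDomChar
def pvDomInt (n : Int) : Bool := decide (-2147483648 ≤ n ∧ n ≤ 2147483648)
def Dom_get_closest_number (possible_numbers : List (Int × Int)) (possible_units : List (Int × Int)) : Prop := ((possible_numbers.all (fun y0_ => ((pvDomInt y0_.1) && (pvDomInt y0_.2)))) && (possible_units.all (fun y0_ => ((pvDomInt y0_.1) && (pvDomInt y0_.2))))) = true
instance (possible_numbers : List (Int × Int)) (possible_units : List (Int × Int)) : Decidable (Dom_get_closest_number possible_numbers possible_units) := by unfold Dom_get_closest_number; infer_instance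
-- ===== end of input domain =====

-- B replaces A's filter + stable sort + head with one best-tracking pass (strict < keeps the first minimal diff).

-- ===== PORT A =====
-- A: build diffs = [(p, fu - n) for (p, n) in possible_numbers if fu - n > 0], stable-sort by the diff, return head's p; 0 otherwise.
def get_closest_number (possible_numbers : List (Int × Int)) (possible_units : List (Int × Int)) : Int :=
  match possible_units with
  | [] => 0
  | u :: _ =>
    let first_unit_place := u.2
    let diffs := possible_numbers.filterMap
      (fun pr => if first_unit_place - pr.2 > 0 then some (pr.1, first_unit_place - pr.2) else none)
    match PySem.List.sorted diffs (fun x => x.2) with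
    | [] => 0
    | d :: _ => d.1

-- ===== PORT B =====
-- one step of B's loop: keep the first pair with the strictly smallest positive diff
def gcnStep (first_unit_place : Int) (best : Option (Int × Int)) (pr : Int × Int) : Option (Int × Int) :=
  let d := first_unit_place - pr.2
  if d > 0 then
    match best with
    | none => some (pr.1, d)
    | some b => if d < b.2 then some (pr.1, d) else best
  else best

def get_closest_number_alt (possible_numbers : List (Int × Int)) (possible_units : List (Int × Int)) : Int :=
  match possible_units with
  | [] => 0
  | u :: _ =>
    match possible_numbers.foldl (gcnStep u.2) none with
    | none => 0
    | some b => b.1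

-- ===== PRECONDITION & SPEC =====
def Spec_get_closest_number (possible_numbers : List (Int × Int)) (possible_units : List (Int × Int)) (out : Int) : Prop := out = get_closest_number_alt possible_numbers possible_units
instance (possible_numbers : List (Int × Int)) (possible_units : List (Int × Int)) (out : Int) : Decidable (Spec_get_closest_number possible_numbers possible_units out) := by unfold Spec_get_closest_number; infer_instance

-- ===== CLAIM (what is proved, stated in full; the proofs are below) =====
def Claim_equal_get_closest_number : Prop := ∀ (possible_numbers : List (Int × Int)) (possible_units : List (Int × Int)), Dom_get_closest_number possible_numbers possible_units → Spec_get_closest_number possible_numbers possible_units (get_closest_number possible_numbers possible_units)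

-- ===== LEMMAS AND PROOFS =====

-- the min-tracking step on an already-filtered (p, d) pair
def gcnStep' (best : Option (Int × Int)) (x : Int × Int) : Option (Int × Int) :=
  match best with
  | none => some x
  | some b => if x.2 < b.2 then some x else best

theorem foldl_gcnStep_filterMap (fu : Int) (pn : List (Int × Int)) (acc : Option (Int × Int)) :
    pn.foldl (gcnStep fu) acc
      = (pn.filterMap (fun pr => if fu - pr.2 > 0 then some (pr.1, fu - pr.2) else none)).foldl gcnStep' acc := by
  induction pn generalizing acc with
  | nil => rfl
  | cons pr rest ih =>
    by_cases h : fu - pr.2 > 0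
    · have h' : pr.2 < fu := by omega
      simp [h', ih, gcnStep, gcnStep']
    · have h' : ¬ pr.2 < fu := by omega
      simp [h', ih, gcnStep]

theorem head?_insertBy (x : Int × Int) (l : List (Int × Int)) :
    (PySem.List.insertBy (fun a b => decide (a.2 < b.2)) x l).head? = gcnStep' l.head? x := by
  cases l with
  | nil => rfl
  | cons y ys =>
    by_cases h : x.2 < y.2 <;> simp [PySem.List.insertBy, h, gcnStep']

theorem head?_foldl_insertBy (ds : List (Int × Int)) (acc : List (Int × Int)) :
    (ds.foldl (fun acc x => PySem.List.insertBy (fun a b => decide (a.2 < b.2)) x acc) acc).head?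
      = ds.foldl gcnStep' acc.head? := by
  induction ds generalizing acc with
  | nil => rfl
  | cons d rest ih => simp [List.foldl_cons, ih, head?_insertBy]

theorem head?_sorted (ds : List (Int × Int)) :
    (PySem.List.sorted ds (fun x => x.2)).head? = ds.foldl gcnStep' none := by
  rw [PySem.List.sorted_eq_foldl_insertBy]
  exact head?_foldl_insertBy ds []

-- ===== VERDICT (by name: the statement is the Claim_ definition above) =====
theorem get_closest_number_spec : Claim_equal_get_closest_number := by
  intro pn pu _
  unfold Spec_get_closest_number
  cases pu with
  | nil => rfl
  | cons u rest =>
    simp only [get_closest_number, get_closest_number_alt]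
    rw [foldl_gcnStep_filterMap, ← head?_sorted]
    cases PySem.List.sorted
      (pn.filterMap (fun pr => if u.2 - pr.2 > 0 then some (pr.1, u.2 - pr.2) else none))
      (fun x => x.2) <;> rfl
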